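-- pv_equiv track=rewrite | github.com/RenzeSneep/Mass-finder | mass_calculator.py | minus_H
-- ===== SOURCE A (Python) =====
-- def minus_H(molecular_formula):
--     '''
--     Subtracts one H atom from a molecular formula.
--
--     Args:
--         molecular_formula (str): A molecular formula.
--
--     Returns:
--         molecular_formula_minus_H (str): The molecular formula minus one H.
--
--     '''
--     fragment=[]
--     elements_in_formula=[]
--     number=[]
--
--     pos=0
--     for i in range(len(molecular_formula)):
--         if molecular_formula[i].isupper():
--             a=molecular_formula[pos:i]
--             pos=i
--             fragment.append(a)
--     a=molecular_formula[pos:]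
--     fragment.append(a)
--     fragment.pop(0)
--     for i in fragment:
--         pos2=0
--         dig=0
--         for j in range(len(i)):
--             if i[j].isdigit():
--                 b=i[pos2:j]
--                 pos2=j
--                 elements_in_formula.append(b)
--                 dig=1
--                 break
--         c=i[pos2:]
--         if dig==0:
--             elements_in_formula.append(i)
--             c=1
--         number.append(c)
--     molecular_formula_minus_H = ""
--     for j in range(len(number)):
--         if number[j] == 1:
--             number[j] = ""
--     for i in range(len(elements_in_formula)):
--         if elements_in_formula[i] == "H":
--             number[i] = int(number[i])-1
--         molecular_formula_minus_H += elements_in_formula[i] + str(number[i])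
--
--     return molecular_formula_minus_H
-- ===== SOURCE B (Python) =====
-- def _emit(element, number):
--     if element == "H":
--         return element + str(int(number) - 1)
--     return element + number
--
--
-- def minus_H(molecular_formula):
--     out = ""
--     element = None  # nothing emitted before the first uppercase letter
--     number = ""
--     for ch in molecular_formula:
--         if ch.isupper():
--             if element is not None:
--                 out += _emit(element, number)
--             element, number = ch, ""
--         elif element is not None:
--             if number or ch.isdigit():
--                 number += ch
--             else:
--                 element += ch
--     if element is not None:
--         out += _emit(element, number)
--     return out
-- ===== Notes on version B (the rewrite author's own statement) =====
-- stated objective: simpler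
-- what changed: A's four-pass pipeline (index loop collecting slice boundaries, a fragment list, parallel element/number lists with an int-1 sentinel, then two fix-up passes over those lists) is replaced by a single left-to-right state-machine pass that builds each element/number pair incrementally and emits output as soon as a fragment ends.
import Mathlib
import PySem

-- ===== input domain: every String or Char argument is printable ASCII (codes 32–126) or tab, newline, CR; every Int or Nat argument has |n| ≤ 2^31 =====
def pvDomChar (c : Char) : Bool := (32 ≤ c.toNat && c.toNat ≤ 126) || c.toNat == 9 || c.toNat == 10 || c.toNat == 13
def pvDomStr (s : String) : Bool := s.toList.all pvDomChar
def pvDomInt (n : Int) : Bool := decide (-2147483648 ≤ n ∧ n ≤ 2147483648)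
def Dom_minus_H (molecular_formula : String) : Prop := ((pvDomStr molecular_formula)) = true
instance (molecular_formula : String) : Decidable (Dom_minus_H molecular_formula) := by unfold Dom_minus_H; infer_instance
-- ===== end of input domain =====

-- B replaces A's four-pass slice-and-fix-up pipeline by one single-pass state machine (return values only; neither version mutates anything a caller sees).

-- ===== PORT A =====
-- '<1-char str>.isupper()' / '.isdigit()': exact on the printable-ASCII domain (A-Z resp. 0-9)
def pyUpper (c : Char) : Bool := 65 ≤ c.toNat && c.toNat ≤ 90
def pyDigit (c : Char) : Bool := 48 ≤ c.toNat && c.toNat ≤ 57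

-- A's first loop: for i in range(len(s)): if s[i].isupper(): fragment.append(s[pos:i]); pos = i
def minusH_loop1 (s : List Char) (frag : List (List Char)) (pos i : Nat) : List (List Char) × Nat :=
  if h : i < s.length then
    if pyUpper s[i] then
      minusH_loop1 s (frag ++ [PySem.List.slice s (some (pos : Int)) (some (i : Int))]) i (i + 1)
    else minusH_loop1 s frag pos (i + 1)
  else (frag, pos)
termination_by s.length - i

-- A's inner 'for j in range(len(i)): if i[j].isdigit(): …; break' loop: position of the first digit
def firstDigit (f : List Char) (j : Nat) : Option Nat :=
  match f with
  | [] => none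
  | c :: cs => if pyDigit c then some j else firstDigit cs (j + 1)

-- A's second loop over the fragments; 'none' records the Python int 1 that A stores when no digit exists
def minusH_loop2 (frags : List (List Char)) : List (List Char) × List (Option (List Char)) :=
  frags.foldl
    (fun st f =>
      match firstDigit f 0 with
      | some j => (st.1 ++ [PySem.List.slice f (some 0) (some (j : Int))],
                   st.2 ++ [some (PySem.List.slice f (some (j : Int)) none)])
      | none => (st.1 ++ [f], st.2 ++ [none]))
    ([], [])

-- A's fourth loop; 'int(number[i])' raises exactly where ofChars? is none — those inputs are outside Pre_
def minusH_loop4 (elements : List (List Char)) (number : List (List Char)) : List Char :=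
  (List.range elements.length).foldl
    (fun acc i =>
      let e := elements.getD i []
      if e == ['H'] then
        acc ++ e ++ PySem.Int.toChars ((PySem.Int.ofChars? (number.getD i [])).getD 0 - 1)
      else acc ++ e ++ number.getD i [])
    []

def minus_H (molecular_formula : String) : String :=
  let s := molecular_formula.toList
  let r := minusH_loop1 s [] 0 0
  let fragment := (r.1 ++ [PySem.List.slice s (some (r.2 : Int)) none]).tail
  let en := minusH_loop2 fragment
  let number := en.2.map (fun n => n.getD [])
  String.ofList (minusH_loop4 en.1 number)

-- ===== PORT B =====
def emitFrag (e num : List Char) : List Char :=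
  if e == ['H'] then e ++ PySem.Int.toChars ((PySem.Int.ofChars? num).getD 0 - 1)
  else e ++ num

-- B's only loop, state (out, element, number), as structural recursion over the characters
def bLoop (out : List Char) (elem : Option (List Char)) (num : List Char) : List Char → List Char
  | [] => match elem with
          | some e => out ++ emitFrag e num
          | none => out
  | c :: cs =>
    if pyUpper c then
      match elem with
      | some e => bLoop (out ++ emitFrag e num) (some [c]) [] cs
      | none => bLoop out (some [c]) [] cs
    else
      match elem with
      | some e =>
        if !num.isEmpty || pyDigit c then bLoop out (some e) (num ++ [c]) cs
        else bLoop out (some (e ++ [c])) num cs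
      | none => bLoop out none num cs

def minus_H_alt (molecular_formula : String) : String :=
  String.ofList (bLoop [] none [] molecular_formula.toList)

-- ===== PRECONDITION & SPEC =====
def notD (c : Char) : Bool := !pyDigit c

-- the uppercase-started fragments of the formula (leading non-uppercase junk dropped)
def frSplit (l : List Char) : List (List Char) :=
  (l.foldr (fun c st => if pyUpper c then ([], (c :: st.1) :: st.2) else (c :: st.1, st.2))
    ([], [])).2

-- Pre_ excludes exactly the inputs where A raises ValueError: a fragment whose element part is "H"
-- but whose number part is not a valid int() literal (it is missing, or carries trailing junk)
def Pre_minus_H (molecular_formula : String) : Prop :=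
  ∀ f ∈ frSplit molecular_formula.toList,
    f.takeWhile notD = ['H'] → (PySem.Int.ofChars? (f.dropWhile notD)).isSome = true
instance (molecular_formula : String) : Decidable (Pre_minus_H molecular_formula) := by
  unfold Pre_minus_H; infer_instance
def pvWitness_minus_H : String := "C6H12O6"

def Spec_minus_H (molecular_formula : String) (out : String) : Prop := out = minus_H_alt molecular_formula
instance (molecular_formula : String) (out : String) : Decidable (Spec_minus_H molecular_formula out) := by unfold Spec_minus_H; infer_instance

-- ===== CLAIM (what is proved, stated in full; the proofs are below) =====
def Claim_equal_minus_H : Prop := ∀ (molecular_formula : String), Dom_minus_H molecular_formula → Pre_minus_H molecular_formula → Spec_minus_H molecular_formula (minus_H molecular_formula)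

-- ===== LEMMAS AND PROOFS =====

def notU (c : Char) : Bool := !pyUpper c

-- the common specification both ports are reduced to: emit each fragment, split at its first digit
def procFrag (f : List Char) : List Char := emitFrag (f.takeWhile notD) (f.dropWhile notD)

theorem upper_not_digit {c : Char} (h : pyUpper c = true) : pyDigit c = false := by
  simp [pyUpper] at h; simp [pyDigit]; omega

theorem frSplit_fst (l : List Char) :
    (l.foldr (fun c st => if pyUpper c then ([], (c :: st.1) :: st.2) else (c :: st.1, st.2))
      ([], [])).1 = l.takeWhile notU := by
  induction l with
  | nil => rfl
  | cons c cs ih =>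
    by_cases h : pyUpper c = true <;> simp [List.takeWhile_cons, notU, h, ih]

theorem frSplit_nil : frSplit [] = [] := rfl

theorem frSplit_cons (c : Char) (cs : List Char) :
    frSplit (c :: cs)
      = if pyUpper c then (c :: cs.takeWhile notU) :: frSplit cs else frSplit cs := by
  unfold frSplit
  by_cases h : pyUpper c = true <;> simp [h, frSplit_fst]

theorem frSplit_dropWhile (cs : List Char) : frSplit (cs.dropWhile notU) = frSplit cs := by
  induction cs with
  | nil => rfl
  | cons c cs ih =>
    by_cases h : pyUpper c = true
    · simp [notU, h]
    · simp only [List.dropWhile_cons, notU, h, Bool.not_false, if_true, ih]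
      rw [frSplit_cons]; simp [h]

theorem frSplit_cons' (c : Char) (cs : List Char) :
    frSplit (c :: cs)
      = if pyUpper c then (c :: cs.takeWhile notU) :: frSplit (cs.dropWhile notU) else frSplit cs := by
  rw [frSplit_cons, frSplit_dropWhile]

theorem firstDigit_eq (f : List Char) : ∀ j,
    firstDigit f j = if f.dropWhile notD = [] then none else some (j + (f.takeWhile notD).length) := by
  induction f with
  | nil => intro j; simp [firstDigit]
  | cons c cs ih =>
    intro j
    by_cases h : pyDigit c = true
    · simp [firstDigit, h, notD]
    · simp only [firstDigit, h, ih (j+1), List.dropWhile_cons, List.takeWhile_cons, notD]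
      simp only [Bool.not_eq_eq_eq_not, Bool.not_true] at h
      simp [h]
      split_ifs <;> simp <;> omega

-- take/drop at the takeWhile boundary

theorem take_takeWhile (p : Char → Bool) (f : List Char) :
    f.take (f.takeWhile p).length = f.takeWhile p := by
  induction f with
  | nil => rfl
  | cons c cs ih => by_cases h : p c = true <;> simp [List.takeWhile_cons, h, ih]

theorem drop_takeWhile (p : Char → Bool) (f : List Char) :
    f.drop (f.takeWhile p).length = f.dropWhile p := by
  induction f with
  | nil => rfl
  | cons c cs ih => by_cases h : p c = true <;> simp [List.takeWhile_cons, List.dropWhile_cons, h, ih]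

-- closed form of loop1

theorem slice_from_nat (s : List Char) (pos : Nat) :
    PySem.List.slice s (some (pos : Int)) none = s.drop pos := by
  rw [PySem.List.slice_from s (by omega)]; simp

theorem slice_snoc (s : List Char) (pos i : Nat) (hpi : pos ≤ i) (hi : i < s.length) :
    PySem.List.slice s (some (pos : Int)) (some ((i + 1 : Nat) : Int))
      = PySem.List.slice s (some (pos : Int)) (some (i : Int)) ++ [s[i]] := by
  rw [PySem.List.slice_natCast, PySem.List.slice_natCast]
  rw [show i + 1 - pos = (i - pos) + 1 by omega, List.take_succ]
  congr 1
  rw [List.getElem?_drop]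
  simp [show pos + (i - pos) = i by omega, hi]

theorem slice_one (s : List Char) (i : Nat) (hi : i < s.length) :
    PySem.List.slice s (some (i : Int)) (some ((i + 1 : Nat) : Int)) = [s[i]] := by
  rw [slice_snoc s i i le_rfl hi, PySem.List.slice_natCast]
  simp

def pieces (s : List Char) (pos i : Nat) : List (List Char) :=
  if h : i < s.length then
    if pyUpper s[i] then PySem.List.slice s (some (pos : Int)) (some (i : Int)) :: pieces s i (i + 1)
    else pieces s pos (i + 1)
  else [PySem.List.slice s (some (pos : Int)) none]
termination_by s.length - i

theorem loop1_pieces (s : List Char) : ∀ k i pos frag, s.length - i ≤ k →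
    (minusH_loop1 s frag pos i).1 ++
        [PySem.List.slice s (some ((minusH_loop1 s frag pos i).2 : Int)) none]
      = frag ++ pieces s pos i := by
  intro k
  induction k with
  | zero =>
    intro i pos frag h
    have hi : ¬ i < s.length := by omega
    rw [minusH_loop1.eq_def, pieces.eq_def]
    simp [hi]
  | succ k ih =>
    intro i pos frag h
    by_cases hi : i < s.length
    · rw [minusH_loop1.eq_def, pieces.eq_def]
      simp only [hi, dif_pos]
      by_cases hU : pyUpper s[i] = true
      · simp only [hU, if_true]
        rw [ih (i+1) i _ (by omega)]
        simp
      · simp only [hU, if_false]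
        exact ih (i+1) pos frag (by omega)
    · rw [minusH_loop1.eq_def, pieces.eq_def]
      simp [hi]

theorem pieces_top (s : List Char) (pos : Nat) (hp : pos ≤ s.length) :
    pieces s pos s.length
      = (PySem.List.slice s (some (pos : Int)) (some ((s.length : Nat) : Int))
          ++ (s.drop s.length).takeWhile notU)
        :: frSplit ((s.drop s.length).dropWhile notU) := by
  rw [pieces.eq_def]
  simp only [lt_irrefl, dite_false]
  rw [List.drop_eq_nil_iff.mpr le_rfl]
  simp only [List.takeWhile_nil, List.dropWhile_nil, frSplit_nil, List.append_nil]
  rw [slice_from_nat, PySem.List.slice_natCast]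
  rw [List.take_of_length_le (by simp)]

theorem pieces_frSplit (s : List Char) : ∀ k i pos, s.length - i ≤ k → pos ≤ i → i ≤ s.length →
      pieces s pos i
        = (PySem.List.slice s (some (pos : Int)) (some (i : Int)) ++ (s.drop i).takeWhile notU)
            :: frSplit ((s.drop i).dropWhile notU) := by
  intro k
  induction k with
  | zero =>
    intro i pos h hpi hin
    have : i = s.length := by omega
    subst this
    exact pieces_top s pos hpi
  | succ k ih =>
    intro i pos h hpi hin
    by_cases hi : i < s.length
    · have hdrop : s.drop i = s[i] :: s.drop (i + 1) := List.drop_eq_getElem_cons hi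
      rw [pieces.eq_def]
      simp only [hi, dif_pos]
      by_cases hU : pyUpper s[i] = true
      · simp only [hU, if_true]
        rw [ih (i + 1) i (by omega) (by omega) (by omega)]
        rw [hdrop]
        simp only [List.takeWhile_cons, List.dropWhile_cons, notU, hU, Bool.not_true,
          Bool.false_eq_true, if_false, List.append_nil]
        rw [frSplit_cons']
        simp only [hU, if_true]
        rw [slice_one s i hi]; simp
      · simp only [hU, if_false]
        rw [ih (i + 1) pos (by omega) (by omega) (by omega)]
        rw [hdrop]
        simp only [List.takeWhile_cons, List.dropWhile_cons, notU, hU, Bool.not_false, if_true]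
        rw [slice_snoc s pos i hpi hi]
        simp
    · have : i = s.length := by omega
      subst this
      exact pieces_top s pos hpi

theorem loop2_go (fs : List (List Char)) : ∀ (a : List (List Char)) (b : List (Option (List Char))),
    fs.foldl
      (fun st f =>
        match firstDigit f 0 with
        | some j => (st.1 ++ [PySem.List.slice f (some 0) (some (j : Int))],
                     st.2 ++ [some (PySem.List.slice f (some (j : Int)) none)])
        | none => (st.1 ++ [f], st.2 ++ [none]))
      (a, b)
    = (a ++ fs.map (fun f => f.takeWhile notD),
       b ++ fs.map (fun f => if f.dropWhile notD = [] then none else some (f.dropWhile notD))) := by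
  induction fs with
  | nil => intro a b; simp
  | cons f fs ih =>
    intro a b
    rw [List.foldl_cons]
    by_cases h : f.dropWhile notD = []
    · have htw : f.takeWhile notD = f := by
        have := List.takeWhile_append_dropWhile (p := notD) (l := f)
        rw [h] at this; simpa using this
      have hfd := firstDigit_eq f 0
      rw [hfd, if_pos h]
      rw [ih]
      simp [h]
      refine ⟨htw.symm, fun x hx => ?_⟩
      rw [← htw] at hx
      exact List.mem_takeWhile_imp hx
    · have hfd := firstDigit_eq f 0
      rw [hfd, if_neg h]
      rw [ih]
      have h0 : PySem.List.slice f (some 0) (some ((0 + (f.takeWhile notD).length : Nat) : Int))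
          = f.takeWhile notD := by
        rw [show (0:Int) = ((0:Nat):Int) from rfl, PySem.List.slice_natCast]
        simpa using take_takeWhile notD f
      have h1 : PySem.List.slice f (some ((0 + (f.takeWhile notD).length : Nat) : Int)) none
          = f.dropWhile notD := by
        rw [slice_from_nat]
        simpa using drop_takeWhile notD f
      simp only [Nat.zero_add] at h0 h1 ⊢
      rw [h0, h1]
      simp [h]
      have hx := (List.dropWhile_eq_nil_iff).not.mp h
      simpa using hx

theorem loop2_eq (fs : List (List Char)) :
    minusH_loop2 fs = (fs.map (fun f => f.takeWhile notD),
      fs.map (fun f => if f.dropWhile notD = [] then none else some (f.dropWhile notD))) := by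
  unfold minusH_loop2
  rw [loop2_go]
  simp

theorem foldl_range_getD (g : List Char → List Char) (fs : List (List Char)) :
    ∀ acc, (List.range fs.length).foldl (fun acc i => acc ++ g (fs.getD i [])) acc
      = acc ++ fs.flatMap g := by
  induction fs with
  | nil => intro acc; simp
  | cons f fs ih =>
    intro acc
    rw [show (f :: fs).length = fs.length + 1 from rfl, List.range_succ_eq_map]
    rw [List.foldl_cons, List.foldl_map]
    simp only [List.getD_cons_zero, List.getD_cons_succ]
    rw [ih]
    simp

theorem getD_map (h : List Char → List Char) (fs : List (List Char)) (i : Nat) (hi : i < fs.length) :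
    (fs.map h).getD i [] = h (fs.getD i []) := by
  rw [List.getD_eq_getElem?_getD, List.getD_eq_getElem?_getD, List.getElem?_map]
  simp [List.getElem?_eq_getElem hi]

theorem loop4_eq (fs : List (List Char)) :
    minusH_loop4 (fs.map (fun f => f.takeWhile notD)) (fs.map (fun f => f.dropWhile notD))
      = fs.flatMap procFrag := by
  unfold minusH_loop4
  rw [List.length_map]
  rw [PySem.List.foldl_congr_mem _ _ (fun acc i => acc ++ procFrag (fs.getD i [])) []
    (by
      intro acc i hi
      have hlt : i < fs.length := List.mem_range.mp hi
      rw [getD_map _ _ _ hlt, getD_map _ _ _ hlt]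
      dsimp only
      unfold procFrag emitFrag
      split_ifs <;> simp)]
  simpa using foldl_range_getD procFrag fs []

theorem minus_H_spec_eq (m : String) :
    minus_H m = String.ofList ((frSplit m.toList).flatMap procFrag) := by
  unfold minus_H
  dsimp only
  have hfrag : ((minusH_loop1 m.toList [] 0 0).1
      ++ [PySem.List.slice m.toList (some ((minusH_loop1 m.toList [] 0 0).2 : Int)) none]).tail
      = frSplit m.toList := by
    rw [loop1_pieces m.toList m.toList.length 0 0 [] (by omega),
      pieces_frSplit m.toList m.toList.length 0 0 (by omega) le_rfl (by omega)]
    simp [frSplit_dropWhile]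
  rw [hfrag, loop2_eq, List.map_map]
  have hnum : ((fun n => Option.getD n []) ∘ fun f => if f.dropWhile notD = [] then none else some (f.dropWhile notD))
      = fun (f : List Char) => f.dropWhile notD := by
    funext f
    simp only [Function.comp_apply]
    by_cases h : f.dropWhile notD = []
    · rw [if_pos h, Option.getD_none, h]
    · rw [if_neg h, Option.getD_some]
  rw [hnum, loop4_eq]

theorem bLoop_cons_upper_some {c : Char} (h : pyUpper c = true) (out e num cs) :
    bLoop out (some e) num (c :: cs) = bLoop (out ++ emitFrag e num) (some [c]) [] cs := by
  simp [bLoop, h]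

theorem bLoop_cons_upper_none {c : Char} (h : pyUpper c = true) (out num cs) :
    bLoop out none num (c :: cs) = bLoop out (some [c]) [] cs := by
  simp [bLoop, h]

theorem bLoop_cons_num {c : Char} {num : List Char} (h : pyUpper c = false)
    (h2 : (!num.isEmpty || pyDigit c) = true) (out e cs) :
    bLoop out (some e) num (c :: cs) = bLoop out (some e) (num ++ [c]) cs := by
  simp [bLoop, h, h2]

theorem bLoop_cons_elem {c : Char} {num : List Char} (h : pyUpper c = false)
    (h2 : (!num.isEmpty || pyDigit c) = false) (out e cs) :
    bLoop out (some e) num (c :: cs) = bLoop out (some (e ++ [c])) num cs := by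
  simp [bLoop, h]
  intro hne
  simp_all

theorem bLoop_cons_none {c : Char} (h : pyUpper c = false) (out num cs) :
    bLoop out none num (c :: cs) = bLoop out none num cs := by
  simp [bLoop, h]

theorem bLoop_out (cs : List Char) : ∀ out elem num,
    bLoop out elem num cs = out ++ bLoop [] elem num cs := by
  induction cs with
  | nil => intro out elem num; cases elem <;> simp [bLoop]
  | cons c cs ih =>
    intro out elem num
    cases elem with
    | none =>
      by_cases h : pyUpper c = true
      · rw [bLoop_cons_upper_none h, bLoop_cons_upper_none h, ih, ih []]
      · rw [bLoop_cons_none (by simp [h]), bLoop_cons_none (by simp [h]), ih]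
    | some e =>
      by_cases h : pyUpper c = true
      · rw [bLoop_cons_upper_some h, bLoop_cons_upper_some h, ih, ih ([] ++ emitFrag e num)]
        simp
      · by_cases h2 : (!num.isEmpty || pyDigit c) = true
        · rw [bLoop_cons_num (by simp [h]) h2, bLoop_cons_num (by simp [h]) h2, ih, ih []]
        · rw [bLoop_cons_elem (by simp [h]) (by simp_all), bLoop_cons_elem (by simp [h]) (by simp_all), ih, ih []]

theorem bLoop_some (cs : List Char) : ∀ e num,
    bLoop [] (some e) num cs
      = (if num = [] then
            emitFrag (e ++ (cs.takeWhile notU).takeWhile notD) ((cs.takeWhile notU).dropWhile notD)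
          else emitFrag e (num ++ cs.takeWhile notU))
        ++ (frSplit (cs.dropWhile notU)).flatMap procFrag := by
  induction cs with
  | nil =>
    intro e num
    split_ifs with h <;> simp_all [bLoop, frSplit_nil]
  | cons c cs ih =>
    intro e num
    by_cases hU : pyUpper c = true
    · have hD := upper_not_digit hU
      rw [bLoop_cons_upper_some hU, bLoop_out, ih [c] []]
      simp only [List.takeWhile_cons, List.dropWhile_cons, notU, hU, Bool.not_true, Bool.false_eq_true, if_false, if_true]
      rw [frSplit_cons']
      simp only [hU, if_true, List.flatMap_cons]
      have hproc : procFrag (c :: cs.takeWhile notU)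
          = emitFrag ([c] ++ (cs.takeWhile notU).takeWhile notD) ((cs.takeWhile notU).dropWhile notD) := by
        simp [procFrag, List.takeWhile_cons, List.dropWhile_cons, notD, hD]
      split_ifs <;> simp_all [List.append_assoc]
    · by_cases hnum : num = []
      · subst hnum
        by_cases hD : pyDigit c = true
        · rw [bLoop_cons_num (by simp [hU]) (by simp [hD]), ih e ([] ++ [c])]
          simp [List.takeWhile_cons, List.dropWhile_cons, notU, notD, hU, hD]
        · rw [bLoop_cons_elem (by simp [hU]) (by simp [hD]), ih (e ++ [c]) []]
          simp [List.takeWhile_cons, List.dropWhile_cons, notU, notD, hU, hD]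
      · rw [bLoop_cons_num (by simp [hU]) (by simp [List.isEmpty_iff, hnum]), ih e (num ++ [c])]
        have h2 : num ++ [c] ≠ [] := by simp
        simp [hnum, h2, List.takeWhile_cons, List.dropWhile_cons, notU, hU]

theorem bLoop_none (cs : List Char) : bLoop [] none [] cs = (frSplit cs).flatMap procFrag := by
  induction cs with
  | nil => simp [bLoop, frSplit_nil]
  | cons c cs ih =>
    by_cases hU : pyUpper c = true
    · have hD := upper_not_digit hU
      rw [bLoop_cons_upper_none hU, bLoop_some cs [c] []]
      rw [frSplit_cons']
      simp only [hU, if_true, List.flatMap_cons]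
      have hproc : procFrag (c :: cs.takeWhile notU)
          = emitFrag ([c] ++ (cs.takeWhile notU).takeWhile notD) ((cs.takeWhile notU).dropWhile notD) := by
        simp [procFrag, List.takeWhile_cons, List.dropWhile_cons, notD, hD]
      simp [hproc]
    · rw [bLoop_cons_none (by simp [hU]), ih, frSplit_cons']
      simp [hU]

-- ===== VERDICT (by name: the statement is the Claim_ definition above) =====
theorem minus_H_spec : Claim_equal_minus_H := by
  intro m _ _
  unfold Spec_minus_H
  rw [minus_H_spec_eq]
  unfold minus_H_alt
  rw [bLoop_none]
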